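-- pv_equiv track=rewrite | github.com/alainrk/pythonChallenges | misc/nearerServices.py | solve
-- ===== SOURCE A (Python) =====
-- import copy
--
-- def solve(buildings):
--   current = copy.deepcopy(buildings[0])
--   infinity = len(buildings) + 1
--   nservices = 0
--
--   for service in buildings[0].keys():
--     # Init with max distance possible
--     current[service] = infinity
--     nservices += 1
--
--   # Build init DB
--   distances = [copy.deepcopy(current) for x in buildings]
--
--   for i in range(len(buildings)):
--     # Update current
--     for service in buildings[i]:
--       if buildings[i][service]:
--         current[service] = 0
--       else:
--         current[service] += 1
--
--     # Update distances => Forward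
--     for service in buildings[i]:
--       if distances[i][service] > current[service]:
--         distances[i][service] = current[service]
--
--   # Reset current
--   for service in buildings[0].keys():
--     # Init with max distance possible
--     current[service] = infinity
--
--   # Best finding variables
--   bestBuildingIndex = -1
--   minSumDistance = infinity * nservices
--
--   # Update distances => Backward
--   for i in range(len(buildings) - 1, -1, -1):
--     # Update current
--     for service in buildings[i]:
--       if buildings[i][service]:
--         current[service] = 0
--       else:
--         current[service] += 1
--
--     # Update distances
--     sumDistance = 0
--     for service in buildings[i]:
--       if distances[i][service] > current[service]:
--         distances[i][service] = current[service]
--       sumDistance += distances[i][service]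
--
--     if sumDistance < minSumDistance:
--       minSumDistance = sumDistance
--       bestBuildingIndex = i
--
--   return bestBuildingIndex
-- ===== SOURCE B (Python) =====
-- def solve(buildings):
--     n = len(buildings)
--     infinity = n + 1
--     services = list(buildings[0].keys())
--     # positions of each service: service -> sorted list of building indices offering it
--     positions = {s: [] for s in services}
--     for i, b in enumerate(buildings):
--         for s, v in b.items():
--             if v:
--                 positions[s].append(i)
--     bestBuildingIndex = -1
--     minSumDistance = infinity * len(services)
--     for i in range(n - 1, -1, -1):
--         total = 0
--         for s in services:
--             total += min((abs(i - j) for j in positions[s]), default=infinity)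
--         if total < minSumDistance:
--             minSumDistance = total
--             bestBuildingIndex = i
--     return bestBuildingIndex
-- ===== Notes on version B (the rewrite author's own statement) =====
-- stated objective: alternative
-- what changed: Replaces A's mutable per-building distance dicts updated by forward and backward incremental sweeps with a service-to-sorted-position index built once, from which each building's sum of nearest-service distances is computed directly as min |i-j|.
-- outside the precondition, e.g. on solve([{'a': True}, {}]): A returns 1, B returns 0
import Mathlib
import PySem

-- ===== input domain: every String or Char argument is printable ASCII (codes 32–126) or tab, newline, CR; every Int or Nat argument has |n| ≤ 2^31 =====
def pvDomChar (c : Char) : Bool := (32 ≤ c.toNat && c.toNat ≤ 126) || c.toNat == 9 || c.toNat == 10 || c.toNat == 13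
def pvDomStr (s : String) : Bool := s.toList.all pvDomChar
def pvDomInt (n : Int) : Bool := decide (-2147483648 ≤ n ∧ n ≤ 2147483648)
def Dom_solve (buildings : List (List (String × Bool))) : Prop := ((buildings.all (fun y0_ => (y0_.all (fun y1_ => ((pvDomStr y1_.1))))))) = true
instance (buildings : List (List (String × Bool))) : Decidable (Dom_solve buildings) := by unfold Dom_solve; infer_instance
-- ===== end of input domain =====

-- B replaces A's mutable forward/backward sweeps over per-building distance dicts by a
-- service → sorted-position index and a direct nearest-distance minimum per building (alternative).

-- ===== PORT A =====
def solve (buildings : List (List (String × Bool))) : Int :=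
  -- current = deepcopy(buildings[0]); every key is then overwritten with infinity,
  -- so current is the dict mapping each key of buildings[0] to infinity (nservices counts the keys)
  let b0 := PySem.Dict.ofList (PySem.List.pyGetD buildings 0 [])
  let inf : Int := PySem.List.len buildings + 1
  let init := b0.keys.foldl
    (fun (p : PySem.Dict String Int × Int) s => (p.1.insert s inf, p.2 + 1))
    (PySem.Dict.empty, 0)
  let current := init.1
  let nservices := init.2
  let distances := buildings.map (fun _ => current)
  -- forward pass: for i in range(len(buildings))
  let fw := (PySem.List.pyRange 0 (PySem.List.len buildings) 1).foldl
    (fun (st : PySem.Dict String Int × List (PySem.Dict String Int)) i =>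
      let bld := PySem.Dict.ofList (PySem.List.pyGetD buildings i [])
      -- current[service] += 1 is exact as modify with default 0: Pre_ guarantees the key is present
      let cur := bld.keys.foldl
        (fun c s => if bld.getD s false then c.insert s 0 else c.modify s 0 (· + 1)) st.1
      let di := bld.keys.foldl
        (fun d s => if d.getD s 0 > cur.getD s 0 then d.insert s (cur.getD s 0) else d)
        (PySem.List.pyGetD st.2 i PySem.Dict.empty)
      (cur, PySem.List.pySetD st.2 i di))
    (current, distances)
  -- reset current
  let current2 := b0.keys.foldl (fun c s => c.insert s inf) fw.1
  -- backward pass: for i in range(len(buildings)-1, -1, -1), tracking (bestBuildingIndex, minSumDistance)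
  let res := (PySem.List.pyRange (PySem.List.len buildings - 1) (-1) (-1)).foldl
    (fun (st : (PySem.Dict String Int × List (PySem.Dict String Int)) × Int × Int) i =>
      let bld := PySem.Dict.ofList (PySem.List.pyGetD buildings i [])
      let cur := bld.keys.foldl
        (fun c s => if bld.getD s false then c.insert s 0 else c.modify s 0 (· + 1)) st.1.1
      let ds := bld.keys.foldl
        (fun (p : PySem.Dict String Int × Int) s =>
          let d' := if p.1.getD s 0 > cur.getD s 0 then p.1.insert s (cur.getD s 0) else p.1
          (d', p.2 + d'.getD s 0))
        (PySem.List.pyGetD st.1.2 i PySem.Dict.empty, 0)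
      let best := if ds.2 < st.2.2 then (i, ds.2) else st.2
      ((cur, PySem.List.pySetD st.1.2 i ds.1), best))
    ((current2, fw.2), (-1, inf * nservices))
  res.2.1

-- ===== PORT B =====
def solve_alt (buildings : List (List (String × Bool))) : Int :=
  let n := PySem.List.len buildings
  let inf : Int := n + 1
  let services := (PySem.Dict.ofList (PySem.List.pyGetD buildings 0 [])).keys
  let positions0 := services.foldl
    (fun (d : PySem.Dict String (List Int)) s => d.insert s []) PySem.Dict.empty
  let positions := (PySem.List.enumerate buildings).foldl
    (fun d ib => (PySem.Dict.ofList ib.2).items.foldl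
      (fun d p => if p.2 then d.modify p.1 [] (· ++ [ib.1]) else d) d)
    positions0
  let res := (PySem.List.pyRange (n - 1) (-1) (-1)).foldl
    (fun (st : Int × Int) i =>
      let total := services.foldl
        (fun acc s =>
          acc + PySem.List.minD ((positions.getD s []).map (fun j => |i - j|)) (fun x => x) inf)
        0
      if total < st.2 then (i, total) else st)
    (-1, inf * PySem.List.len services)
  res.1

-- ===== PRECONDITION & SPEC =====
-- Pre_ excludes the empty list (buildings[0] raises IndexError) and buildings whose key sets
-- differ from buildings[0]'s (extra keys make A raise KeyError; on missing keys A's sum over a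
-- varying key set is accidental) and association lists with duplicate keys (no Python dict has them).
def Pre_solve (buildings : List (List (String × Bool))) : Prop :=
  buildings ≠ [] ∧
    ∀ b ∈ buildings, (b.map Prod.fst).Nodup ∧
      b.map Prod.fst ⊆ (buildings.getD 0 []).map Prod.fst ∧
      (buildings.getD 0 []).map Prod.fst ⊆ b.map Prod.fst

instance (buildings : List (List (String × Bool))) : Decidable (Pre_solve buildings) := by
  unfold Pre_solve; infer_instance

def pvWitness_solve : (List (List (String × Bool))) := [[("a", true)], [("a", false)]]

def Spec_solve (buildings : List (List (String × Bool))) (out : Int) : Prop := out = solve_alt buildings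
instance (buildings : List (List (String × Bool))) (out : Int) : Decidable (Spec_solve buildings out) := by unfold Spec_solve; infer_instance

-- ===== CLAIM (what is proved, stated in full; the proofs are below) =====
def Claim_equal_solve : Prop := ∀ (buildings : List (List (String × Bool))), Dom_solve buildings → Pre_solve buildings → Spec_solve buildings (solve buildings)

-- ===== LEMMAS AND PROOFS =====

-- ---- scalar models of the per-service computations ----

-- truth value of service s in building b (Python: buildings[i][service], as a Bool)
def pvTv (b : List (String × Bool)) (s : String) : Bool := (PySem.Dict.ofList b).getD s false

-- one step of A's running-distance update
def pvFstep (c : Int) (b : Bool) : Int := if b then 0 else c + 1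

-- A's forward "current" value after scanning l
def pvFcur (c : Int) (l : List Bool) : Int := l.foldl pvFstep c

-- A's backward "current" value when the remaining suffix is l
def pvBcur (inf : Int) : List Bool → Int
  | [] => inf
  | b :: r => if b then 0 else pvBcur inf r + 1

-- positions (offset by ofs) of the true entries of a Bool list
def pvPos (ofs : Int) : List Bool → List Int
  | [] => []
  | b :: r => (if b then [ofs] else []) ++ pvPos (ofs + 1) r

-- ---- buildings-indexed abbreviations ----

def pvBld (bs : List (List (String × Bool))) (k : Nat) : PySem.Dict String Bool :=
  PySem.Dict.ofList (bs.getD k [])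

def pvK (bs : List (List (String × Bool))) : List String := (pvBld bs 0).keys

def pvInf (bs : List (List (String × Bool))) : Int := (bs.length : Int) + 1

def pvC0 (bs : List (List (String × Bool))) : PySem.Dict String Int :=
  (pvK bs).foldl (fun d s => d.insert s (pvInf bs)) PySem.Dict.empty

def pvCurStep (bs : List (List (String × Bool))) (k : Nat) (c : PySem.Dict String Int) :
    PySem.Dict String Int :=
  (pvBld bs k).keys.foldl
    (fun c s => if (pvBld bs k).getD s false then c.insert s 0 else c.modify s 0 (· + 1)) c

def pvCurA (bs : List (List (String × Bool))) : Nat → PySem.Dict String Int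
  | 0 => pvC0 bs
  | k + 1 => pvCurStep bs k (pvCurA bs k)

def pvDistA (bs : List (List (String × Bool))) (k : Nat) : PySem.Dict String Int :=
  (pvBld bs k).keys.foldl
    (fun d s => if d.getD s 0 > (pvCurA bs (k + 1)).getD s 0
      then d.insert s ((pvCurA bs (k + 1)).getD s 0) else d)
    (pvC0 bs)

def pvTs (bs : List (List (String × Bool))) (s : String) : List Bool := bs.map (fun b => pvTv b s)

def pvFin (bs : List (List (String × Bool))) (s : String) (k : Nat) : Int :=
  min (min (pvInf bs) (pvFcur (pvInf bs) ((pvTs bs s).take (k + 1))))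
    (pvBcur (pvInf bs) ((pvTs bs s).drop k))

def pvSV (bs : List (List (String × Bool))) (k : Nat) : Int :=
  ((pvK bs).map (fun s => pvFin bs s k)).sum

-- ---- generic fold lemmas ----

theorem pv_getD_foldl_keys {ν : Type} (dflt : ν) (L : List String) (hL : L.Nodup)
    (step : PySem.Dict String ν → String → PySem.Dict String ν) (F : String → ν → ν)
    (hstep : ∀ c s x, (step c s).getD x dflt = if x = s then F s (c.getD s dflt) else c.getD x dflt)
    (d : PySem.Dict String ν) (x : String) :
    (L.foldl step d).getD x dflt = if x ∈ L then F x (d.getD x dflt) else d.getD x dflt := by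
  induction L generalizing d with
  | nil => simp
  | cons a t ih =>
    rcases List.nodup_cons.mp hL with ⟨ha, ht⟩
    rw [List.foldl_cons, ih ht, hstep d a x]
    by_cases hx : x = a
    · subst hx; simp [ha]
    · simp [hx]

theorem pv_minD_eq_of (xs : List Int) (d m : Int) (h1 : m ∈ xs) (h2 : ∀ y ∈ xs, m ≤ y) :
    PySem.List.minD xs (fun x => x) d = m := by
  cases xs with
  | nil => simp at h1
  | cons x t =>
    rw [PySem.List.minD, PySem.List.min?_id_cons, Option.getD_some]
    have h3 := PySem.List.foldl_min_le t x
    have h4 := PySem.List.foldl_min_mem t x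
    apply le_antisymm
    · rcases List.mem_cons.mp h1 with rfl | hmt
      · exact h3.1
      · exact h3.2 m hmt
    · rcases h4 with h4 | h4
      · rw [h4]; exact h2 x (List.mem_cons_self)
      · exact h2 _ (List.mem_cons_of_mem _ h4)

-- ---- pvPos facts ----

theorem pvPos_append (u v : List Bool) (ofs : Int) :
    pvPos ofs (u ++ v) = pvPos ofs u ++ pvPos (ofs + u.length) v := by
  induction u generalizing ofs with
  | nil => simp [pvPos]
  | cons b t ih =>
    simp only [List.cons_append, pvPos, ih (ofs + 1), List.append_assoc, List.length_cons]
    have hoff : ofs + 1 + (t.length : Int) = ofs + (((t.length + 1 : Nat)) : Int) := by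
      push_cast
      ring
    rw [hoff]

theorem mem_pvPos_bounds (u : List Bool) (ofs j : Int) (h : j ∈ pvPos ofs u) :
    ofs ≤ j ∧ j < ofs + u.length := by
  induction u generalizing ofs with
  | nil => simp [pvPos] at h
  | cons b t ih =>
    simp only [pvPos, List.mem_append] at h
    rcases h with h | h
    · cases b with
      | false => simp at h
      | true =>
        simp at h
        subst h
        simp only [List.length_cons]
        push_cast
        omega
    · have := ih (ofs + 1) h
      simp only [List.length_cons]
      push_cast
      push_cast at this
      omega

theorem pvPos_shift (a ofs : Int) (u : List Bool) :
    pvPos (a + ofs) u = (pvPos ofs u).map (a + ·) := by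
  induction u generalizing ofs with
  | nil => simp [pvPos]
  | cons b t ih =>
    simp only [pvPos, List.map_append]
    congr 1
    · cases b <;> simp
    · rw [show a + ofs + 1 = a + (ofs + 1) by ring, ih (ofs + 1)]

theorem pvPos_mem_of (u : List Bool) (ofs : Int) (k : Nat) (hk : k < u.length)
    (ht : u.getD k false = true) : ofs + k ∈ pvPos ofs u := by
  induction u generalizing ofs k with
  | nil => simp at hk
  | cons b t ih =>
    cases k with
    | zero =>
      simp only [List.getD_cons_zero] at ht
      subst ht
      simp [pvPos]
    | succ k =>
      simp only [List.getD_cons_succ] at ht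
      have := ih (ofs + 1) k (by simpa using hk) ht
      simp only [pvPos, List.mem_append]
      right
      have heq : ofs + (((k + 1 : Nat)) : Int) = ofs + 1 + (k : Int) := by push_cast; ring
      rw [heq]
      exact this

theorem pvPos_head_le (u : List Bool) (ofs j : Int) (h : (pvPos ofs u).head? = some j) :
    ∀ k ∈ pvPos ofs u, j ≤ k := by
  induction u generalizing ofs with
  | nil => simp [pvPos] at h
  | cons b t ih =>
    cases b with
    | false =>
      have hp : pvPos ofs (false :: t) = pvPos (ofs + 1) t := by simp [pvPos]
      rw [hp] at h ⊢
      exact ih (ofs + 1) h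
    | true =>
      have hp : pvPos ofs (true :: t) = ofs :: pvPos (ofs + 1) t := by simp [pvPos]
      rw [hp] at h ⊢
      rw [List.head?_cons, Option.some.injEq] at h
      subst h
      intro k hk
      rcases List.mem_cons.mp hk with rfl | hk
      · exact le_rfl
      · have := mem_pvPos_bounds t (ofs + 1) k hk
        omega

theorem pvPos_le_getLast (u : List Bool) (ofs j : Int) (h : (pvPos ofs u).getLast? = some j) :
    ∀ k ∈ pvPos ofs u, k ≤ j := by
  induction u using List.reverseRecOn generalizing j with
  | nil => simp [pvPos] at h
  | append_singleton t b ih =>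
    cases b with
    | false =>
      have hp : pvPos ofs (t ++ [false]) = pvPos ofs t := by
        rw [pvPos_append]
        simp [pvPos]
      rw [hp] at h ⊢
      exact ih j h
    | true =>
      have hp : pvPos ofs (t ++ [true]) = pvPos ofs t ++ [ofs + (t.length : Int)] := by
        rw [pvPos_append]
        simp [pvPos]
      rw [hp] at h ⊢
      rw [List.getLast?_concat, Option.some.injEq] at h
      subst h
      intro k hk
      rcases List.mem_append.mp hk with hk | hk
      · have := mem_pvPos_bounds t ofs k hk
        omega
      · simp at hk
        omega

-- ---- closed forms for the sweeps ----

theorem pv_minD_nil (d : Int) : PySem.List.minD ([] : List Int) (fun x => x) d = d := rfl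

theorem pv_getLast?_mem {α : Type} (l : List α) (a : α) (h : l.getLast? = some a) : a ∈ l := by
  induction l with
  | nil => simp at h
  | cons x t ih =>
    cases t with
    | nil => simp_all
    | cons y u =>
      simp only [List.getLast?_cons_cons] at h
      exact List.mem_cons_of_mem _ (ih h)

theorem pv_head?_mem {α : Type} (l : List α) (a : α) (h : l.head? = some a) : a ∈ l := by
  cases l with
  | nil => simp at h
  | cons x t => simp at h; simp [h]

theorem pvFcur_closed (u : List Bool) (c : Int) :
    pvFcur c u = match (pvPos 0 u).getLast? with
      | none => c + u.length
      | some j => (u.length : Int) - 1 - j := by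
  induction u using List.reverseRecOn with
  | nil => simp [pvFcur, pvPos]
  | append_singleton t b ih =>
    have hful : pvFcur c (t ++ [b]) = pvFstep (pvFcur c t) b := by
      simp [pvFcur, List.foldl_append]
    rw [hful, pvPos_append]
    cases b with
    | true =>
      simp only [pvPos, if_true, List.append_nil, List.getLast?_concat, pvFstep]
      simp
    | false =>
      simp only [pvPos, Bool.false_eq_true, if_false, List.append_nil, pvFstep, ih]
      cases h : (pvPos 0 t).getLast? with
      | none => simp [h]; push_cast; ring
      | some j => simp [h]; push_cast; ring

theorem pvFcur_none (u : List Bool) (c : Int) (h : (pvPos 0 u).getLast? = none) :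
    pvFcur c u = c + u.length := by
  rw [pvFcur_closed, h]

theorem pvFcur_some (u : List Bool) (c j : Int) (h : (pvPos 0 u).getLast? = some j) :
    pvFcur c u = (u.length : Int) - 1 - j := by
  rw [pvFcur_closed, h]

theorem pvBcur_closed (v : List Bool) (inf : Int) :
    pvBcur inf v = match (pvPos 0 v).head? with
      | none => inf + v.length
      | some j => j := by
  induction v with
  | nil => simp [pvBcur, pvPos]
  | cons b r ih =>
    cases b with
    | true => simp [pvBcur, pvPos]
    | false =>
      have h1 : pvPos 0 (false :: r) = pvPos 1 r := by simp [pvPos]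
      have hp : pvPos 0 (false :: r) = (pvPos 0 r).map (1 + ·) := by
        rw [h1]
        have := pvPos_shift 1 0 r
        simpa using this
      have hb : pvBcur inf (false :: r) = pvBcur inf r + 1 := by simp [pvBcur]
      rw [hb, ih, hp, List.head?_map]
      cases h : (pvPos 0 r).head? with
      | none =>
        simp only [Option.map_none, List.length_cons]
        push_cast
        ring
      | some j =>
        simp only [Option.map_some]
        ring

theorem pvBcur_none (v : List Bool) (inf : Int) (h : (pvPos 0 v).head? = none) :
    pvBcur inf v = inf + v.length := by
  rw [pvBcur_closed, h]

theorem pvBcur_some (v : List Bool) (inf j : Int) (h : (pvPos 0 v).head? = some j) :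
    pvBcur inf v = j := by
  rw [pvBcur_closed, h]

theorem pvBcur_nonneg (v : List Bool) (inf : Int) (h : 0 ≤ inf) : 0 ≤ pvBcur inf v := by
  induction v with
  | nil => simpa [pvBcur]
  | cons b r ih =>
    simp only [pvBcur]
    split <;> omega

-- ---- the core per-service equivalence ----

theorem pv_core (t : List Bool) (i : Nat) (hi : i < t.length) :
    min (min ((t.length : Int) + 1) (pvFcur ((t.length : Int) + 1) (t.take (i + 1))))
        (pvBcur ((t.length : Int) + 1) (t.drop i))
      = PySem.List.minD ((pvPos 0 t).map (fun j => |(i : Int) - j|)) (fun x => x)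
          ((t.length : Int) + 1) := by
  set n : Int := (t.length : Int) with hn
  set inf : Int := n + 1 with hinf
  have hlen1 : (t.take (i + 1)).length = i + 1 := by
    simp [List.length_take]; omega
  have hlenI : (t.take i).length = i := by simp [List.length_take]; omega
  have hlenD : (t.drop (i + 1)).length = t.length - (i + 1) := by simp
  have hlenW : (t.drop i).length = t.length - i := by simp
  have hP : pvPos 0 t = pvPos 0 (t.take (i + 1)) ++ pvPos ((i : Int) + 1) (t.drop (i + 1)) := by
    have h0 := pvPos_append (t.take (i + 1)) (t.drop (i + 1)) 0
    rw [List.take_append_drop] at h0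
    rw [h0, hlen1]
    push_cast
    ring_nf
  have htake : t.take (i + 1) = t.take i ++ [t[i]] := by
    rw [List.take_succ, List.getElem?_eq_getElem hi]
    rfl
  have hdrop : t.drop i = t[i] :: t.drop (i + 1) := List.drop_eq_getElem_cons hi
  have hbP1 : ∀ j ∈ pvPos 0 (t.take (i + 1)), 0 ≤ j ∧ j ≤ (i : Int) := by
    intro j hj
    have := mem_pvPos_bounds _ _ _ hj
    rw [hlen1] at this
    push_cast at this
    omega
  have hbase : ∀ j ∈ pvPos 0 (t.drop (i + 1)), 0 ≤ j ∧ j < n - (i : Int) - 1 := by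
    intro j hj
    have := mem_pvPos_bounds _ _ _ hj
    rw [hlenD] at this
    push_cast at this
    omega
  have hinfpos : (0 : Int) ≤ inf := by rw [hinf, hn]; positivity
  have hni : (i : Int) < n := by rw [hn]; exact_mod_cast hi
  cases hx : t[i] with
  | true =>
    have hmem : (i : Int) ∈ pvPos 0 t := by
      have := pvPos_mem_of t 0 i hi (by rw [List.getD_eq_getElem _ _ hi, hx])
      simpa using this
    have hrhs : PySem.List.minD ((pvPos 0 t).map (fun j => |(i : Int) - j|)) (fun x => x) inf
        = 0 := by
      apply pv_minD_eq_of
      · exact List.mem_map.mpr ⟨(i : Int), hmem, by simp⟩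
      · intro y hy
        rcases List.mem_map.mp hy with ⟨j, _, rfl⟩
        positivity
    rw [hrhs]
    have hlast : (pvPos 0 (t.take (i + 1))).getLast? = some (i : Int) := by
      rw [htake, pvPos_append, hlenI]
      simp [pvPos, hx, List.getLast?_concat]
    rw [pvFcur_some _ _ _ hlast, hlen1]
    have h1 : (((i : Nat) + 1 : Nat) : Int) - 1 - (i : Int) = 0 := by push_cast; ring
    rw [h1, min_eq_right hinfpos]
    exact min_eq_left (pvBcur_nonneg _ _ hinfpos)
  | false =>
    have hw : pvPos 0 (t.drop i) = (pvPos 0 (t.drop (i + 1))).map (1 + ·) := by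
      rw [hdrop]
      simp only [pvPos, hx, Bool.false_eq_true, if_false, List.nil_append]
      have := pvPos_shift 1 0 (t.drop (i + 1))
      simpa using this
    have hP2 : pvPos ((i : Int) + 1) (t.drop (i + 1))
        = (pvPos 0 (t.drop (i + 1))).map (fun j => (i : Int) + 1 + j) := by
      have := pvPos_shift ((i : Int) + 1) 0 (t.drop (i + 1))
      simpa using this
    cases h1 : (pvPos 0 (t.take (i + 1))).getLast? with
    | none =>
      have hP1e : pvPos 0 (t.take (i + 1)) = [] := List.getLast?_eq_none_iff.mp h1
      have hfval : pvFcur inf (t.take (i + 1)) = inf + ((i : Int) + 1) := by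
        rw [pvFcur_none _ _ h1, hlen1]
        push_cast
        ring
      cases h2 : (pvPos 0 (t.drop (i + 1))).head? with
      | none =>
        have hP2e : pvPos 0 (t.drop (i + 1)) = [] := List.head?_eq_none_iff.mp h2
        have hbval : pvBcur inf (t.drop i) = inf + ((t.drop i).length : Int) :=
          pvBcur_none _ _ (by rw [hw, List.head?_map, h2]; rfl)
        rw [hfval, hbval, hP, hP2, hP1e, hP2e]
        simp only [List.map_nil, List.nil_append, List.append_nil]
        rw [pv_minD_nil, min_eq_left (by omega : inf ≤ inf + ((i : Int) + 1))]
        exact min_eq_left (by omega)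
      | some r =>
        have hr := hbase r (pv_head?_mem _ _ h2)
        have hbval : pvBcur inf (t.drop i) = 1 + r :=
          pvBcur_some _ _ _ (by rw [hw, List.head?_map, h2]; rfl)
        rw [hfval, hbval, hP, hP2, hP1e]
        simp only [List.map_nil, List.nil_append, List.map_map]
        rw [min_eq_left (by omega : inf ≤ inf + ((i : Int) + 1)),
          min_eq_right (by omega : (1 : Int) + r ≤ inf)]
        refine ((pv_minD_eq_of _ _ _ ?_ ?_).symm)
        · refine List.mem_map.mpr ⟨r, pv_head?_mem _ _ h2, ?_⟩
          simp only [Function.comp_apply]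
          rw [abs_of_nonpos (by omega)]
          ring
        · intro y hy
          rcases List.mem_map.mp hy with ⟨k, hk, rfl⟩
          have hkb := hbase k hk
          have hkr := pvPos_head_le _ _ _ h2 k hk
          simp only [Function.comp_apply]
          rw [abs_of_nonpos (by omega)]
          omega
    | some j1 =>
      have hj1 := hbP1 j1 (pv_getLast?_mem _ _ h1)
      have hfval : pvFcur inf (t.take (i + 1)) = (i : Int) - j1 := by
        rw [pvFcur_some _ _ _ h1, hlen1]
        push_cast
        ring
      have e1 : min inf ((i : Int) - j1) = (i : Int) - j1 := min_eq_right (by omega)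
      cases h2 : (pvPos 0 (t.drop (i + 1))).head? with
      | none =>
        have hP2e : pvPos 0 (t.drop (i + 1)) = [] := List.head?_eq_none_iff.mp h2
        have hbval : pvBcur inf (t.drop i) = inf + ((t.drop i).length : Int) :=
          pvBcur_none _ _ (by rw [hw, List.head?_map, h2]; rfl)
        rw [hfval, hbval, e1, hP, hP2, hP2e]
        simp only [List.map_nil, List.append_nil]
        rw [min_eq_left (by omega)]
        refine ((pv_minD_eq_of _ _ _ ?_ ?_).symm)
        · refine List.mem_map.mpr ⟨j1, pv_getLast?_mem _ _ h1, ?_⟩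
          rw [abs_of_nonneg (by omega)]
        · intro y hy
          rcases List.mem_map.mp hy with ⟨k, hk, rfl⟩
          have hkb := hbP1 k hk
          have hkj := pvPos_le_getLast _ _ _ h1 k hk
          rw [abs_of_nonneg (by omega)]
          omega
      | some r =>
        have hr := hbase r (pv_head?_mem _ _ h2)
        have hbval : pvBcur inf (t.drop i) = 1 + r :=
          pvBcur_some _ _ _ (by rw [hw, List.head?_map, h2]; rfl)
        rw [hfval, hbval, e1, hP, hP2]
        refine ((pv_minD_eq_of _ _ _ ?_ ?_).symm)
        · rcases le_total ((i : Int) - j1) (1 + r) with hle | hle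
          · rw [min_eq_left hle]
            refine List.mem_map.mpr ⟨j1, List.mem_append.mpr (Or.inl (pv_getLast?_mem _ _ h1)), ?_⟩
            rw [abs_of_nonneg (by omega)]
          · rw [min_eq_right hle]
            refine List.mem_map.mpr ⟨(i : Int) + 1 + r,
              List.mem_append.mpr (Or.inr (List.mem_map.mpr ⟨r, pv_head?_mem _ _ h2, rfl⟩)), ?_⟩
            rw [abs_of_nonpos (by omega)]
            ring
        · intro y hy
          rcases List.mem_map.mp hy with ⟨k, hk, rfl⟩
          rcases List.mem_append.mp hk with hk | hk
          · have hkb := hbP1 k hk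
            have hkj := pvPos_le_getLast _ _ _ h1 k hk
            rw [abs_of_nonneg (by omega)]
            have hml := min_le_left ((i : Int) - j1) (1 + r)
            omega
          · rcases List.mem_map.mp hk with ⟨k0, hk0, rfl⟩
            have hkb := hbase k0 hk0
            have hkr := pvPos_head_le _ _ _ h2 k0 hk0
            rw [abs_of_nonpos (by omega)]
            have hmr := min_le_right ((i : Int) - j1) (1 + r)
            omega
-- ---- consequences of Pre_ ----

theorem pvK_nodup (bs : List (List (String × Bool))) : (pvK bs).Nodup :=
  PySem.Dict.nodup_keys_ofList _

theorem pv_mem_foldl_insert_keys {ν : Type} (ps : List (String × ν)) (d : PySem.Dict String ν)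
    (s : String) :
    s ∈ (ps.foldl (fun acc p => acc.insert p.1 p.2) d).keys ↔ s ∈ d.keys ∨ s ∈ ps.map Prod.fst := by
  induction ps generalizing d with
  | nil => simp
  | cons p t ih =>
    rw [List.foldl_cons, ih]
    rw [PySem.Dict.mem_keys_insert]
    simp only [List.map_cons, List.mem_cons]
    tauto

theorem pv_mem_keys_ofList {ν : Type} (ps : List (String × ν)) (s : String) :
    s ∈ (PySem.Dict.ofList ps).keys ↔ s ∈ ps.map Prod.fst := by
  have : PySem.Dict.ofList ps = ps.foldl (fun acc p => acc.insert p.1 p.2) PySem.Dict.empty := rfl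
  rw [this, pv_mem_foldl_insert_keys]
  simp [PySem.Dict.keys_empty]

theorem pv_getD_mem (bs : List (List (String × Bool))) (k : Nat) (hk : k < bs.length) :
    bs.getD k [] ∈ bs := by
  rw [List.getD_eq_getElem _ _ hk]
  exact List.getElem_mem hk

theorem pv_pre_keys (bs : List (List (String × Bool))) (h : Pre_solve bs) (k : Nat)
    (hk : k < bs.length) (s : String) : s ∈ (pvBld bs k).keys ↔ s ∈ pvK bs := by
  have h0 : 0 < bs.length := by
    cases bs
    · exact absurd rfl h.1
    · simp
  have hb := h.2 (bs.getD k []) (pv_getD_mem bs k hk)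
  rw [pvK, pvBld, pvBld, pv_mem_keys_ofList, pv_mem_keys_ofList]
  constructor
  · exact fun hs => hb.2.1 hs
  · exact fun hs => hb.2.2 hs

-- A building's key list is Nodup and enumerates the same set as pvK
theorem pv_bld_nodup (bs : List (List (String × Bool))) (k : Nat) :
    (pvBld bs k).keys.Nodup :=
  PySem.Dict.nodup_keys_ofList _

-- the current-update loop of both passes, read at a key of buildings[0]
theorem pv_cur_fold (bs : List (List (String × Bool))) (h : Pre_solve bs) (k : Nat)
    (hk : k < bs.length) (c : PySem.Dict String Int) (s : String) (hs : s ∈ pvK bs) :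
    ((pvBld bs k).keys.foldl
        (fun c s => if (pvBld bs k).getD s false then c.insert s 0 else c.modify s 0 (· + 1)) c).getD s 0
      = if (pvTs bs s).getD k false then 0 else c.getD s 0 + 1 := by
  rw [pv_getD_foldl_keys 0 _ (pv_bld_nodup bs k) _
    (fun s y => if (pvBld bs k).getD s false then 0 else y + 1)
    (by
      intro c s x
      by_cases hb : (pvBld bs k).getD s false
      · simp [hb, PySem.Dict.getD_insert]
      · simp [hb, PySem.Dict.getD_modify]) c s]
  rw [if_pos ((pv_pre_keys bs h k hk s).mpr hs)]
  have : (pvBld bs k).getD s false = (pvTs bs s).getD k false := by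
    rw [pvTs, List.getD_eq_getElem _ _ (by simpa using hk), List.getElem_map]
    rw [pvBld, List.getD_eq_getElem _ _ hk]
    rfl
  rw [this]

-- sums over the keys of any building equal sums over the keys of buildings[0]
theorem pv_sum_keys (bs : List (List (String × Bool))) (h : Pre_solve bs) (k : Nat)
    (hk : k < bs.length) (g : String → Int) :
    ((pvBld bs k).keys.map g).sum = ((pvK bs).map g).sum := by
  have hperm : (pvBld bs k).keys.Perm (pvK bs) :=
    (List.perm_ext_iff_of_nodup (pv_bld_nodup bs k) (pvK_nodup bs)).mpr (pv_pre_keys bs h k hk)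
  exact (hperm.map g).sum_eq

-- ---- scalar characterizations of A's dicts ----

theorem pvC0_getD (bs : List (List (String × Bool))) (s : String) (hs : s ∈ pvK bs) :
    (pvC0 bs).getD s 0 = pvInf bs := by
  rw [pvC0, pv_getD_foldl_keys 0 _ (pvK_nodup bs) _ (fun _ _ => pvInf bs)
    (by intro c s x; simp only [PySem.Dict.getD_insert]) PySem.Dict.empty s]
  rw [if_pos hs]

theorem pvTs_length (bs : List (List (String × Bool))) (s : String) :
    (pvTs bs s).length = bs.length := by
  simp [pvTs]

theorem pvCurA_getD (bs : List (List (String × Bool))) (h : Pre_solve bs) (k : Nat)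
    (hk : k ≤ bs.length) (s : String) (hs : s ∈ pvK bs) :
    (pvCurA bs k).getD s 0 = pvFcur (pvInf bs) ((pvTs bs s).take k) := by
  induction k with
  | zero => simp [pvCurA, pvFcur, pvC0_getD bs s hs]
  | succ k ih =>
    have hklt : k < bs.length := by omega
    have hkl : k < (pvTs bs s).length := by rw [pvTs_length]; omega
    have htk : (pvTs bs s).take (k + 1) = (pvTs bs s).take k ++ [(pvTs bs s)[k]'hkl] := by
      rw [List.take_succ, List.getElem?_eq_getElem hkl]
      rfl
    rw [pvCurA, pvCurStep, pv_cur_fold bs h k hklt _ s hs, ih (by omega),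
      List.getD_eq_getElem _ _ hkl, htk]
    simp only [pvFcur, List.foldl_append, List.foldl_cons, List.foldl_nil, pvFstep]

theorem pvDistA_getD (bs : List (List (String × Bool))) (h : Pre_solve bs) (k : Nat)
    (hk : k < bs.length) (s : String) (hs : s ∈ pvK bs) :
    (pvDistA bs k).getD s 0
      = min (pvInf bs) (pvFcur (pvInf bs) ((pvTs bs s).take (k + 1))) := by
  rw [pvDistA, pv_getD_foldl_keys 0 _ (pv_bld_nodup bs k) _
    (fun s y => if y > (pvCurA bs (k + 1)).getD s 0 then (pvCurA bs (k + 1)).getD s 0 else y)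
    (by
      intro c s x
      by_cases hb : c.getD s 0 > (pvCurA bs (k + 1)).getD s 0
      · simp [hb, PySem.Dict.getD_insert]
      · simp only [hb, if_false]
        rcases eq_or_ne x s with rfl | hne
        · simp
        · simp [hne]) (pvC0 bs) s]
  rw [if_pos ((pv_pre_keys bs h k hk s).mpr hs)]
  rw [pvC0_getD bs s hs, pvCurA_getD bs h (k + 1) (by omega) s hs]
  rcases le_or_gt (pvInf bs) (pvFcur (pvInf bs) ((pvTs bs s).take (k + 1))) with hle | hlt
  · rw [if_neg (by omega), min_eq_left hle]
  · rw [if_pos (by omega), min_eq_right (by omega)]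
-- ---- small bridges ----

theorem pv_pySetD_natCast {α : Type} (xs : List α) (m : Nat) (hm : m < xs.length) (v : α) :
    PySem.List.pySetD xs (m : Int) v = xs.set m v := by
  simp [PySem.List.pySetD, PySem.List.pySet?, PySem.List.pyIdx?, hm]

theorem pv_set_map_range {β : Type} (n m : Nat) (f : Nat → β) (hm : m < n) (v : β) :
    ((List.range n).map f).set m v = (List.range n).map (fun j => if j = m then v else f j) := by
  apply List.ext_getElem (by simp)
  intro i h1 h2
  simp only [List.length_set, List.length_map, List.length_range] at h1
  rw [List.getElem_set]
  rcases eq_or_ne m i with rfl | hne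
  · simp
  · simp [List.getElem_map, List.getElem_range, Ne.symm hne, hne]

theorem pv_foldl_pair_count (L : List String) (v : Int) (d : PySem.Dict String Int) (c : Int) :
    L.foldl (fun (p : PySem.Dict String Int × Int) s => (p.1.insert s v, p.2 + 1)) (d, c)
      = (L.foldl (fun dd s => dd.insert s v) d, c + L.length) := by
  induction L generalizing d c with
  | nil => simp
  | cons a t ih =>
    rw [List.foldl_cons, List.foldl_cons, ih]
    simp only [List.length_cons]
    congr 1
    push_cast
    ring

-- the distance-update loop of A's backward pass, with its running sum
theorem pv_foldl_pair_sum' (L : List String) (hL : L.Nodup) (cur : PySem.Dict String Int)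
    (d : PySem.Dict String Int) (a : Int) :
    L.foldl (fun (p : PySem.Dict String Int × Int) s =>
        let d' := if p.1.getD s 0 > cur.getD s 0 then p.1.insert s (cur.getD s 0) else p.1
        (d', p.2 + d'.getD s 0)) (d, a)
      = (L.foldl (fun dd s => if dd.getD s 0 > cur.getD s 0 then dd.insert s (cur.getD s 0) else dd) d,
          a + (L.map (fun s => min (d.getD s 0) (cur.getD s 0))).sum) := by
  induction L generalizing d a with
  | nil => simp
  | cons s0 t ih =>
    rcases List.nodup_cons.mp hL with ⟨hs0, ht⟩
    rw [List.foldl_cons, List.foldl_cons]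
    have hd' : ((if d.getD s0 0 > cur.getD s0 0 then d.insert s0 (cur.getD s0 0) else d) : PySem.Dict String Int).getD s0 0
        = min (d.getD s0 0) (cur.getD s0 0) := by
      rcases le_or_gt (d.getD s0 0) (cur.getD s0 0) with hle | hgt
      · rw [if_neg (by omega), min_eq_left hle]
      · rw [if_pos (by omega), PySem.Dict.getD_insert, if_pos rfl, min_eq_right (by omega)]
    simp only []
    rw [ih ht]
    congr 1
    rw [hd']
    have hmap : (t.map (fun s =>
        min (((if d.getD s0 0 > cur.getD s0 0 then d.insert s0 (cur.getD s0 0) else d) : PySem.Dict String Int).getD s 0)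
          (cur.getD s 0)))
        = t.map (fun s => min (d.getD s 0) (cur.getD s 0)) := by
      apply List.map_congr_left
      intro s hst
      have hne : s ≠ s0 := fun hh => hs0 (hh ▸ hst)
      split
      · rw [PySem.Dict.getD_insert, if_neg hne]
      · rfl
    rw [hmap]
    simp only [List.map_cons, List.sum_cons]
    ring

-- ---- A's forward pass ----

theorem pv_forward (bs : List (List (String × Bool))) (h : Pre_solve bs) :
    ∀ m : Nat, m ≤ bs.length →
    ((PySem.List.pyRange 0 (m : Int) 1).foldl
      (fun (st : PySem.Dict String Int × List (PySem.Dict String Int)) i =>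
        let bld := PySem.Dict.ofList (PySem.List.pyGetD bs i [])
        let cur := bld.keys.foldl
          (fun c s => if bld.getD s false then c.insert s 0 else c.modify s 0 (· + 1)) st.1
        let di := bld.keys.foldl
          (fun d s => if d.getD s 0 > cur.getD s 0 then d.insert s (cur.getD s 0) else d)
          (PySem.List.pyGetD st.2 i PySem.Dict.empty)
        (cur, PySem.List.pySetD st.2 i di))
      (pvC0 bs, bs.map (fun _ => pvC0 bs)))
    = (pvCurA bs m, (List.range bs.length).map (fun j => if j < m then pvDistA bs j else pvC0 bs)) := by
  intro m hm
  induction m with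
  | zero =>
    rw [Nat.cast_zero, PySem.List.pyRange_one_eq_nil le_rfl, List.foldl_nil]
    simp only [Nat.not_lt_zero, if_false, Prod.mk.injEq]
    refine ⟨rfl, ?_⟩
    rw [List.map_const', List.map_const', List.length_range]
  | succ m ih =>
    have hmlt : m < bs.length := by omega
    have hcast : (((m + 1 : Nat)) : Int) = (m : Int) + 1 := by push_cast; ring
    rw [hcast, PySem.List.pyRange_one_succ_right (by omega), List.foldl_append,
      ih (by omega), List.foldl_cons, List.foldl_nil]
    have hbld : PySem.Dict.ofList (PySem.List.pyGetD bs ((m : Nat) : Int) []) = pvBld bs m := by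
      rw [PySem.List.pyGetD_natCast]
      rfl
    simp only [hbld]
    have hget2 : PySem.List.pyGetD
        ((List.range bs.length).map fun j => if j < m then pvDistA bs j else pvC0 bs)
        ((m : Nat) : Int) PySem.Dict.empty = pvC0 bs := by
      rw [PySem.List.pyGetD_natCast, PySem.List.getD_map_range _ _ _ _ hmlt]
      simp
    simp only [hget2]
    rw [pv_pySetD_natCast _ m (by simpa using hmlt) _, pv_set_map_range bs.length m _ hmlt]
    simp only [Prod.mk.injEq]
    refine ⟨rfl, ?_⟩
    apply List.map_congr_left
    intro j hj
    rcases eq_or_ne j m with rfl | hne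
    · simp only [if_pos rfl, if_pos (Nat.lt_succ_self j)]
      rfl
    · rw [if_neg hne]
      have : (j < m + 1) ↔ (j < m) := by omega
      rw [if_congr this rfl rfl]

-- ---- A's backward pass reduced to the plain best-sum scan ----

theorem pv_backward (bs : List (List (String × Bool))) (h : Pre_solve bs) :
    ∀ m : Nat, m ≤ bs.length →
    ∀ (c : PySem.Dict String Int) (dl : List (PySem.Dict String Int)) (best : Int × Int),
    (∀ s ∈ pvK bs, c.getD s 0 = pvBcur (pvInf bs) ((pvTs bs s).drop m)) →
    dl.length = bs.length →
    (∀ j : Nat, j < m → dl.getD j PySem.Dict.empty = pvDistA bs j) →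
    ((PySem.List.pyRange ((m : Int) - 1) (-1) (-1)).foldl
      (fun (st : (PySem.Dict String Int × List (PySem.Dict String Int)) × Int × Int) i =>
        let bld := PySem.Dict.ofList (PySem.List.pyGetD bs i [])
        let cur := bld.keys.foldl
          (fun c s => if bld.getD s false then c.insert s 0 else c.modify s 0 (· + 1)) st.1.1
        let ds := bld.keys.foldl
          (fun (p : PySem.Dict String Int × Int) s =>
            let d' := if p.1.getD s 0 > cur.getD s 0 then p.1.insert s (cur.getD s 0) else p.1
            (d', p.2 + d'.getD s 0))
          (PySem.List.pyGetD st.1.2 i PySem.Dict.empty, 0)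
        let best := if ds.2 < st.2.2 then (i, ds.2) else st.2
        ((cur, PySem.List.pySetD st.1.2 i ds.1), best))
      ((c, dl), best)).2
    = (PySem.List.pyRange ((m : Int) - 1) (-1) (-1)).foldl
        (fun p i => if pvSV bs i.toNat < p.2 then (i, pvSV bs i.toNat) else p) best := by
  intro m
  induction m with
  | zero =>
    intro _ c dl best _ _ _
    rw [Nat.cast_zero, show (0 : Int) - 1 = -1 by ring, PySem.List.pyRange_neg_one_eq_nil le_rfl,
      List.foldl_nil, List.foldl_nil]
  | succ m ih =>
    intro hm1 c dl best hc hlen hdl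
    have hmlt : m < bs.length := by omega
    have hcast : (((m + 1 : Nat)) : Int) - 1 = (m : Int) := by push_cast; ring
    rw [hcast, PySem.List.pyRange_neg_one_cons (by omega), List.foldl_cons, List.foldl_cons]
    have hbld : PySem.Dict.ofList (PySem.List.pyGetD bs ((m : Nat) : Int) []) = pvBld bs m := by
      rw [PySem.List.pyGetD_natCast]
      rfl
    simp only [hbld]
    have hget2 : PySem.List.pyGetD dl ((m : Nat) : Int) PySem.Dict.empty = pvDistA bs m := by
      rw [PySem.List.pyGetD_natCast, List.getD_eq_getElem _ _ (by omega)]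
      have := hdl m (Nat.lt_succ_self m)
      rw [List.getD_eq_getElem _ _ (by omega)] at this
      exact this
    simp only [hget2]
    rw [pv_foldl_pair_sum' _ (pv_bld_nodup bs m) _ _ _]
    -- the new current dict
    have hcur' : ∀ s ∈ pvK bs,
        ((pvBld bs m).keys.foldl
          (fun c s => if (pvBld bs m).getD s false then c.insert s 0 else c.modify s 0 (· + 1)) c).getD s 0
        = pvBcur (pvInf bs) ((pvTs bs s).drop m) := by
      intro s hs
      rw [pv_cur_fold bs h m hmlt c s hs, hc s hs]
      have hml : m < (pvTs bs s).length := by rw [pvTs_length]; omega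
      have hdm := List.drop_eq_getElem_cons hml
      rw [hdm, List.getD_eq_getElem _ _ hml]
      cases hxx : (pvTs bs s)[m]'hml <;> simp [pvBcur, hxx]
    -- the sum computed at step m
    have hsum : ((pvBld bs m).keys.map (fun s =>
        min ((pvDistA bs m).getD s 0)
          (((pvBld bs m).keys.foldl
            (fun c s => if (pvBld bs m).getD s false then c.insert s 0 else c.modify s 0 (· + 1)) c).getD s 0))).sum
        = pvSV bs m := by
      have hmc : ((pvBld bs m).keys.map (fun s =>
          min ((pvDistA bs m).getD s 0)
            (((pvBld bs m).keys.foldl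
              (fun c s => if (pvBld bs m).getD s false then c.insert s 0 else c.modify s 0 (· + 1)) c).getD s 0)))
          = (pvBld bs m).keys.map (fun s => pvFin bs s m) := by
        apply List.map_congr_left
        intro s hs
        have hsK : s ∈ pvK bs := (pv_pre_keys bs h m hmlt s).mp hs
        rw [pvDistA_getD bs h m hmlt s hsK, hcur' s hsK, pvFin]
      rw [hmc]
      exact pv_sum_keys bs h m hmlt (fun s => pvFin bs s m)
    simp only [zero_add]
    rw [hsum]
    have htn : ((m : Int)).toNat = m := Int.toNat_natCast m
    rw [htn]
    exact ih (by omega) _ _ _ hcur'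
      (by rw [pv_pySetD_natCast _ m (by omega) _, List.length_set]; exact hlen)
      (by
        intro j hj
        rw [pv_pySetD_natCast _ m (by omega) _]
        rw [List.getD_eq_getElem?_getD, List.getElem?_set_ne (by omega),
          ← List.getD_eq_getElem?_getD]
        exact hdl j (by omega))
-- ---- B's service index ----

theorem pv_inner_pres (L : List (String × Bool)) (i : Int) (d : PySem.Dict String (List Int))
    (s : String) (hs : s ∉ L.map Prod.fst) :
    (L.foldl (fun d p => if p.2 then d.modify p.1 [] (· ++ [i]) else d) d).getD s []
      = d.getD s [] := by
  induction L generalizing d with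
  | nil => simp
  | cons p t ih =>
    simp only [List.map_cons, List.mem_cons, not_or] at hs
    rw [List.foldl_cons, ih _ hs.2]
    split
    · rw [PySem.Dict.getD_modify, if_neg hs.1]
    · rfl

theorem pv_inner_fold (L : List (String × Bool)) (hL : (L.map Prod.fst).Nodup) (i : Int)
    (d : PySem.Dict String (List Int)) (s : String) :
    (L.foldl (fun d p => if p.2 then d.modify p.1 [] (· ++ [i]) else d) d).getD s []
      = if (s, true) ∈ L then d.getD s [] ++ [i] else d.getD s [] := by
  induction L generalizing d with
  | nil => simp
  | cons p t ih =>
    rw [List.map_cons] at hL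
    rcases List.nodup_cons.mp hL with ⟨hp, ht⟩
    rw [List.foldl_cons]
    cases hv : p.2 with
    | false =>
      simp only [hv, Bool.false_eq_true, if_false]
      rw [ih ht]
      have : ((s, true) ∈ p :: t) ↔ ((s, true) ∈ t) := by
        constructor
        · intro hmem
          rcases List.mem_cons.mp hmem with heq | hmem
          · exfalso
            have : p.2 = true := by rw [← heq]
            rw [hv] at this
            exact Bool.false_ne_true this
          · exact hmem
        · exact fun hmem => List.mem_cons_of_mem _ hmem
      rw [if_congr this rfl rfl]
    | true =>
      simp only [hv, if_true]
      by_cases hks : p.1 = s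
      · have hmem : (s, true) ∈ p :: t := by
          rw [← hks, ← hv]
          exact List.mem_cons_self
        rw [if_pos hmem]
        have hnot : s ∉ t.map Prod.fst := by rw [← hks]; exact hp
        rw [pv_inner_pres t i _ s hnot, PySem.Dict.getD_modify, if_pos (by rw [hks])]
        rw [hks]
      · rw [ih ht]
        have hgd : (d.modify p.1 [] (· ++ [i])).getD s [] = d.getD s [] := by
          rw [PySem.Dict.getD_modify, if_neg (fun hh => hks hh.symm)]
        have : ((s, true) ∈ p :: t) ↔ ((s, true) ∈ t) := by
          constructor
          · intro hmem
            rcases List.mem_cons.mp hmem with heq | hmem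
            · exact absurd (congrArg Prod.fst heq.symm) (by simpa using hks)
            · exact hmem
          · exact fun hmem => List.mem_cons_of_mem _ hmem
        rw [if_congr this rfl rfl, hgd]

theorem pv_items_map_fst (b : List (String × Bool)) :
    ((PySem.Dict.ofList b).items.map Prod.fst).Nodup := by
  have := PySem.Dict.nodup_keys_ofList (ps := b)
  simpa [PySem.Dict.keys] using this

theorem pv_items_true_iff (b : List (String × Bool)) (s : String) :
    ((s, true) ∈ (PySem.Dict.ofList b).items) ↔ pvTv b s = true := by
  rw [← PySem.Dict.get?_eq_some_iff_mem_items _ _ _ (PySem.Dict.nodup_keys_ofList b)]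
  rw [pvTv, PySem.Dict.getD_eq_get?_getD]
  cases hq : (PySem.Dict.ofList b).get? s <;> simp [hq]

theorem pv_pos_fold (l : List (List (String × Bool))) (ofs : Int)
    (d : PySem.Dict String (List Int)) (s : String) :
    ((PySem.List.enumerate l ofs).foldl
        (fun d ib => (PySem.Dict.ofList ib.2).items.foldl
          (fun d p => if p.2 then d.modify p.1 [] (· ++ [ib.1]) else d) d) d).getD s []
      = d.getD s [] ++ pvPos ofs (l.map (fun b => pvTv b s)) := by
  induction l generalizing ofs d with
  | nil => simp [PySem.List.enumerate, pvPos]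
  | cons b r ih =>
    rw [PySem.List.enumerate_cons, List.foldl_cons, ih]
    rw [pv_inner_fold _ (pv_items_map_fst b) ofs d s]
    simp only [List.map_cons, pvPos]
    rw [if_congr (pv_items_true_iff b s) rfl rfl]
    cases hb : pvTv b s <;> simp [hb]

theorem pv_positions_getD (bs : List (List (String × Bool))) (s : String) :
    ((PySem.List.enumerate bs).foldl
        (fun d ib => (PySem.Dict.ofList ib.2).items.foldl
          (fun d p => if p.2 then d.modify p.1 [] (· ++ [ib.1]) else d) d)
        ((pvK bs).foldl (fun (d : PySem.Dict String (List Int)) s => d.insert s [])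
          PySem.Dict.empty)).getD s []
      = pvPos 0 (pvTs bs s) := by
  have h0 : ((pvK bs).foldl (fun (d : PySem.Dict String (List Int)) s => d.insert s [])
      PySem.Dict.empty).getD s [] = [] := by
    rw [pv_getD_foldl_keys [] _ (pvK_nodup bs) _ (fun _ _ => [])
      (by intro c s x; simp only [PySem.Dict.getD_insert]) PySem.Dict.empty s]
    split <;> simp
  rw [pv_pos_fold, h0, List.nil_append]
  rfl
-- ---- assembling the two sides ----

def pvScan (bs : List (List (String × Bool))) : Int × Int :=
  (PySem.List.pyRange ((bs.length : Int) - 1) (-1) (-1)).foldl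
    (fun p i => if pvSV bs i.toNat < p.2 then (i, pvSV bs i.toNat) else p)
    (-1, pvInf bs * (pvK bs).length)

theorem pvA_eq (bs : List (List (String × Bool))) (h : Pre_solve bs) :
    solve bs = (pvScan bs).1 := by
  unfold solve
  simp only [PySem.List.len_eq, PySem.List.pyGetD_zero]
  have e1 : PySem.Dict.ofList (bs.getD 0 []) = pvBld bs 0 := rfl
  have e2 : (bs.length : Int) + 1 = pvInf bs := rfl
  simp only [e1, e2]
  have e4 : (pvBld bs 0).keys = pvK bs := rfl
  simp only [e4]
  rw [pv_foldl_pair_count]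
  have e3 : (pvK bs).foldl (fun dd s => dd.insert s (pvInf bs)) PySem.Dict.empty = pvC0 bs := rfl
  simp only [e3, zero_add]
  rw [pv_forward bs h bs.length le_rfl]
  rw [pv_backward bs h bs.length le_rfl _ _ _
    (by
      intro s hs
      rw [pv_getD_foldl_keys 0 _ (pvK_nodup bs) _ (fun _ _ => pvInf bs)
        (by intro c s x; simp only [PySem.Dict.getD_insert]) _ s, if_pos hs]
      rw [show (pvTs bs s).drop bs.length = [] from by
        rw [← pvTs_length bs s]; exact List.drop_length]
      rfl)
    (by simp)
    (by
      intro j hj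
      rw [PySem.List.getD_map_range _ _ _ _ hj, if_pos hj])]
  rfl

theorem pvB_eq (bs : List (List (String × Bool))) (h : Pre_solve bs) :
    solve_alt bs = (pvScan bs).1 := by
  unfold solve_alt
  simp only [PySem.List.len_eq, PySem.List.pyGetD_zero]
  have e1 : PySem.Dict.ofList (bs.getD 0 []) = pvBld bs 0 := rfl
  have e2 : (bs.length : Int) + 1 = pvInf bs := rfl
  simp only [e1, e2]
  have e4 : (pvBld bs 0).keys = pvK bs := rfl
  simp only [e4]
  simp only [pv_positions_getD bs]
  simp only [PySem.List.foldl_add]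
  refine congrArg Prod.fst ?_
  unfold pvScan
  refine PySem.List.foldl_congr_mem _ _ _ _ ?_
  intro acc x hx
  have hxb := (PySem.List.mem_pyRange_neg_one).mp hx
  have hxnn : 0 ≤ x := by omega
  have hxlt : x.toNat < bs.length := by omega
  have htot : (0 : Int) + ((pvK bs).map (fun s =>
      PySem.List.minD ((pvPos 0 (pvTs bs s)).map (fun j => |x - j|)) (fun y => y)
        (pvInf bs))).sum = pvSV bs x.toNat := by
    rw [zero_add, pvSV]
    refine congrArg List.sum ?_
    apply List.map_congr_left
    intro s hsK
    have hcore := pv_core (pvTs bs s) x.toNat (by rw [pvTs_length]; omega)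
    rw [Int.toNat_of_nonneg hxnn] at hcore
    rw [pvTs_length bs s] at hcore
    rw [pvFin]
    exact hcore.symm
  rw [htot]

-- ===== VERDICT (by name: the statement is the Claim_ definition above) =====
theorem solve_spec : Claim_equal_solve := by
  intro bs _ hpre
  unfold Spec_solve
  rw [pvA_eq bs hpre, pvB_eq bs hpre]
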